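-- pv_equiv track=rewrite | github.com/gitclixlogix/-Contentry.ai_1.000 | backend/services/permission_service.py | resolve_inherited_permissions
-- ===== SOURCE A (Python) =====
-- from typing import List, Set, Optional, Dict, Any
--
-- PERMISSION_INHERITANCE = {
--     # Team edit permissions include own edit
--     "content.edit_team": ["content.edit_own"],
--     "content.delete_team": ["content.delete_own"],
--
--     # Publish includes approve and schedule
--     "content.publish": ["content.approve", "content.schedule"],
--
--     # Team analytics includes own analytics
--     "analytics.view_team": ["analytics.view_own"],
--     "analytics.view_enterprise": ["analytics.view_team", "analytics.view_own"],
--     "analytics.export": ["analytics.view_team"],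
--
--     # Team management hierarchy
--     "team.remove_members": ["team.invite_members", "team.view_members"],
--     "team.invite_members": ["team.view_members"],
--     "team.assign_roles": ["team.view_members"],
--
--     # Role management hierarchy
--     "roles.delete": ["roles.edit", "roles.create", "roles.view"],
--     "roles.edit": ["roles.create", "roles.view"],
--     "roles.create": ["roles.view"],
--
--     # Settings hierarchy
--     "settings.edit_billing": ["settings.edit_integrations", "settings.edit_branding", "settings.view"],
--     "settings.edit_integrations": ["settings.view"],
--     "settings.edit_branding": ["settings.view"],
--
--     # Knowledge base hierarchy
--     "knowledge.delete": ["knowledge.upload", "knowledge.view"],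
--     "knowledge.upload": ["knowledge.view"],
--
--     # Scheduler hierarchy
--     "scheduler.manage": ["scheduler.view"],
--
--     # Strategic profiles hierarchy
--     "profiles.delete": ["profiles.edit", "profiles.create", "profiles.view"],
--     "profiles.edit": ["profiles.create", "profiles.view"],
--     "profiles.create": ["profiles.view"],
-- }
--
-- def resolve_inherited_permissions(permissions: List[str]) -> Set[str]:
--     """
--     Resolve all inherited permissions from a given set of permissions.
--     Uses recursive resolution to handle multi-level inheritance.
--
--     Example:
--     - "content.publish" -> also grants "content.approve" and "content.schedule"
--     - "roles.delete" -> also grants "roles.edit", "roles.create", "roles.view"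
--     """
--     resolved = set(permissions)
--     changed = True
--
--     # Keep resolving until no new permissions are added
--     while changed:
--         changed = False
--         for perm in list(resolved):
--             inherited = PERMISSION_INHERITANCE.get(perm, [])
--             for inherited_perm in inherited:
--                 if inherited_perm not in resolved:
--                     resolved.add(inherited_perm)
--                     changed = True
--
--     return resolved
-- ===== SOURCE B (Python) =====
-- from typing import List, Set, Optional, Dict, Any
--
-- PERMISSION_INHERITANCE = {
--     "content.edit_team": ["content.edit_own"],
--     "content.delete_team": ["content.delete_own"],
--     "content.publish": ["content.approve", "content.schedule"],
--     "analytics.view_team": ["analytics.view_own"],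
--     "analytics.view_enterprise": ["analytics.view_team", "analytics.view_own"],
--     "analytics.export": ["analytics.view_team"],
--     "team.remove_members": ["team.invite_members", "team.view_members"],
--     "team.invite_members": ["team.view_members"],
--     "team.assign_roles": ["team.view_members"],
--     "roles.delete": ["roles.edit", "roles.create", "roles.view"],
--     "roles.edit": ["roles.create", "roles.view"],
--     "roles.create": ["roles.view"],
--     "settings.edit_billing": ["settings.edit_integrations", "settings.edit_branding", "settings.view"],
--     "settings.edit_integrations": ["settings.view"],
--     "settings.edit_branding": ["settings.view"],
--     "knowledge.delete": ["knowledge.upload", "knowledge.view"],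
--     "knowledge.upload": ["knowledge.view"],
--     "scheduler.manage": ["scheduler.view"],
--     "profiles.delete": ["profiles.edit", "profiles.create", "profiles.view"],
--     "profiles.edit": ["profiles.create", "profiles.view"],
--     "profiles.create": ["profiles.view"],
-- }
--
--
-- def _children(perm):
--     """Direct children of a permission in the inheritance table."""
--     return PERMISSION_INHERITANCE.get(perm, [])
--
--
-- def resolve_inherited_permissions(permissions: List[str]) -> Set[str]:
--     """Graph search instead of a fixpoint: a BFS worklist started from the given
--     permissions visits every reachable permission exactly once."""
--     seen = set()
--     queue = []
--     for p in permissions: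
--         if p not in seen:
--             seen.add(p)
--             queue.append(p)
--     i = 0
--     while i < len(queue):
--         for child in _children(queue[i]):
--             if child not in seen:
--                 seen.add(child)
--                 queue.append(child)
--         i += 1
--     return seen
-- ===== Notes on version B (the rewrite author's own statement) =====
-- stated objective: alternative
-- what changed: Replaced A's repeat-until-no-change fixpoint (which rescans the whole resolved set every round) with a single-pass BFS worklist that expands each permission exactly once.
import Mathlib
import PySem

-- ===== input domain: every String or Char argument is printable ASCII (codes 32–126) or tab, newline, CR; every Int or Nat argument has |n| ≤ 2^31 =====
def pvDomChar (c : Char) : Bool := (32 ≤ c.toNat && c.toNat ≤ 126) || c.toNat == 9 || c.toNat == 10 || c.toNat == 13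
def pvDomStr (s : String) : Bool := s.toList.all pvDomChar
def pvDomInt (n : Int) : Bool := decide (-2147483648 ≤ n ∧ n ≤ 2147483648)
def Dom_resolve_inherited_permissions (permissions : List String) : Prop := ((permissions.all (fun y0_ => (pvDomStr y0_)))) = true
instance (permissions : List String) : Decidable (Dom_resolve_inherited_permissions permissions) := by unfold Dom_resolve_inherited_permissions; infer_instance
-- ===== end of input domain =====

-- B replaces A's repeat-until-no-change fixpoint with a single-pass BFS worklist that
-- expands each permission exactly once (different algorithm; Python A iterates a set in
-- hash order, so only the RETURNED SET is mirrored — both ports list it in discovery order).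

-- ===== PORT A =====
def PERMISSION_INHERITANCE : PySem.Dict String (List String) := PySem.Dict.ofList [
  ("content.edit_team", ["content.edit_own"]),
  ("content.delete_team", ["content.delete_own"]),
  ("content.publish", ["content.approve", "content.schedule"]),
  ("analytics.view_team", ["analytics.view_own"]),
  ("analytics.view_enterprise", ["analytics.view_team", "analytics.view_own"]),
  ("analytics.export", ["analytics.view_team"]),
  ("team.remove_members", ["team.invite_members", "team.view_members"]),
  ("team.invite_members", ["team.view_members"]),
  ("team.assign_roles", ["team.view_members"]),
  ("roles.delete", ["roles.edit", "roles.create", "roles.view"]),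
  ("roles.edit", ["roles.create", "roles.view"]),
  ("roles.create", ["roles.view"]),
  ("settings.edit_billing", ["settings.edit_integrations", "settings.edit_branding", "settings.view"]),
  ("settings.edit_integrations", ["settings.view"]),
  ("settings.edit_branding", ["settings.view"]),
  ("knowledge.delete", ["knowledge.upload", "knowledge.view"]),
  ("knowledge.upload", ["knowledge.view"]),
  ("scheduler.manage", ["scheduler.view"]),
  ("profiles.delete", ["profiles.edit", "profiles.create", "profiles.view"]),
  ("profiles.edit", ["profiles.create", "profiles.view"]),
  ("profiles.create", ["profiles.view"])]

-- PERMISSION_INHERITANCE.get(perm, [])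
def pvInherited (perm : String) : List String := PySem.Dict.getD PERMISSION_INHERITANCE perm []

-- fuel for the totality guard of A's 'while changed': one more than the number of child
-- entries of the table, a bound on how often 'resolved' can grow (proved sufficient below)
def pvFuelA : Nat := (PySem.Dict.values PERMISSION_INHERITANCE).flatten.length + 1

-- one 'for perm in list(resolved)' pass: snapshot iterated, live resolved in the accumulator
def pvPassA (resolved : List String) : List String × Bool :=
  resolved.foldl (fun st perm =>
    (pvInherited perm).foldl (fun st c => if c ∈ st.1 then st else (st.1 ++ [c], true)) st)
    (resolved, false)

-- 'while changed' (fuel only makes the loop total)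
def pvLoopA : Nat → List String → List String
  | 0, resolved => resolved
  | f + 1, resolved =>
    let st := pvPassA resolved
    if st.2 then pvLoopA f st.1 else st.1

def resolve_inherited_permissions (permissions : List String) : List String :=
  pvLoopA pvFuelA (PySem.Set.ofList permissions)

-- ===== PORT B =====
-- Source B's _children(perm) = PERMISSION_INHERITANCE.get(perm, []): the same constant table,
-- rendered as the first-match lookup chain over its literal keys (keys distinct, so exact)
def pvChildrenB (perm : String) : List String :=
  if "content.edit_team" == perm then ["content.edit_own"]
  else if "content.delete_team" == perm then ["content.delete_own"]
  else if "content.publish" == perm then ["content.approve", "content.schedule"]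
  else if "analytics.view_team" == perm then ["analytics.view_own"]
  else if "analytics.view_enterprise" == perm then ["analytics.view_team", "analytics.view_own"]
  else if "analytics.export" == perm then ["analytics.view_team"]
  else if "team.remove_members" == perm then ["team.invite_members", "team.view_members"]
  else if "team.invite_members" == perm then ["team.view_members"]
  else if "team.assign_roles" == perm then ["team.view_members"]
  else if "roles.delete" == perm then ["roles.edit", "roles.create", "roles.view"]
  else if "roles.edit" == perm then ["roles.create", "roles.view"]
  else if "roles.create" == perm then ["roles.view"]
  else if "settings.edit_billing" == perm then ["settings.edit_integrations", "settings.edit_branding", "settings.view"]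
  else if "settings.edit_integrations" == perm then ["settings.view"]
  else if "settings.edit_branding" == perm then ["settings.view"]
  else if "knowledge.delete" == perm then ["knowledge.upload", "knowledge.view"]
  else if "knowledge.upload" == perm then ["knowledge.view"]
  else if "scheduler.manage" == perm then ["scheduler.view"]
  else if "profiles.delete" == perm then ["profiles.edit", "profiles.create", "profiles.view"]
  else if "profiles.edit" == perm then ["profiles.create", "profiles.view"]
  else if "profiles.create" == perm then ["profiles.view"]
  else []

-- the initial 'for p in permissions: if p not in seen: …' loop (seen = queue afterwards)
def pvInitB (permissions : List String) : List String :=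
  permissions.foldl (fun seen p => if seen.contains p then seen else seen.concat p) []

-- 'while i < len(queue)': recursion on the unprocessed queue suffix; the inner 'for child'
-- loop appends each unseen child to both seen and the queue (fuel only makes it total:
-- the queue holds distinct permissions, so 34 = child entries + 1 steps past the input suffice)
def pvVisitB (seen work : List String) : Nat → List String
  | 0 => seen
  | fuel + 1 =>
    match work with
    | [] => seen
    | p :: rest =>
      let st := (pvChildrenB p).foldl
        (fun (st : List String × List String) c =>
          if st.1.contains c then st else (st.1.concat c, st.2.concat c)) (seen, rest)
      pvVisitB st.1 st.2 fuel

def resolve_inherited_permissions_alt (permissions : List String) : List String :=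
  let queue := pvInitB permissions
  pvVisitB queue queue (permissions.length + 34)

-- ===== PRECONDITION & SPEC =====
def Spec_resolve_inherited_permissions (permissions : List String) (out : List String) : Prop := out = resolve_inherited_permissions_alt permissions
instance (permissions : List String) (out : List String) : Decidable (Spec_resolve_inherited_permissions permissions out) := by unfold Spec_resolve_inherited_permissions; infer_instance

-- ===== CLAIM (what is proved, stated in full; the proofs are below) =====
def Claim_equal_resolve_inherited_permissions : Prop := ∀ (permissions : List String), Dom_resolve_inherited_permissions permissions → Spec_resolve_inherited_permissions permissions (resolve_inherited_permissions permissions)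

-- ===== LEMMAS AND PROOFS =====

-- shared vocabulary for the proofs
def pvAdd (r : List String) (c : String) : List String := if c ∈ r then r else r ++ [c]
def pvPush (r : List String) (p : String) : List String := (pvInherited p).foldl pvAdd r
def pvKidsD : List String := PySem.List.dedup ((PySem.Dict.values PERMISSION_INHERITANCE).flatten)
def pvMissing (r : List String) : Nat := (pvKidsD.filter (fun x => decide (x ∉ r))).length

-- proof-side normal form of B's worklist loop (pvVisitB is rewritten to this below)
def pvBFS : Nat → List String → List String → List String
  | 0, seen, _ => seen
  | _ + 1, seen, [] => seen
  | f + 1, seen, p :: rest =>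
    let st := (pvInherited p).foldl
      (fun st c => if c ∈ st.1 then st else (st.1 ++ [c], st.2 ++ [c])) (seen, rest)
    pvBFS f st.1 st.2

set_option maxHeartbeats 2000000 in
theorem pvDict_mk : PERMISSION_INHERITANCE = PySem.Dict.mk [
  ("content.edit_team", ["content.edit_own"]),
  ("content.delete_team", ["content.delete_own"]),
  ("content.publish", ["content.approve", "content.schedule"]),
  ("analytics.view_team", ["analytics.view_own"]),
  ("analytics.view_enterprise", ["analytics.view_team", "analytics.view_own"]),
  ("analytics.export", ["analytics.view_team"]),
  ("team.remove_members", ["team.invite_members", "team.view_members"]),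
  ("team.invite_members", ["team.view_members"]),
  ("team.assign_roles", ["team.view_members"]),
  ("roles.delete", ["roles.edit", "roles.create", "roles.view"]),
  ("roles.edit", ["roles.create", "roles.view"]),
  ("roles.create", ["roles.view"]),
  ("settings.edit_billing", ["settings.edit_integrations", "settings.edit_branding", "settings.view"]),
  ("settings.edit_integrations", ["settings.view"]),
  ("settings.edit_branding", ["settings.view"]),
  ("knowledge.delete", ["knowledge.upload", "knowledge.view"]),
  ("knowledge.upload", ["knowledge.view"]),
  ("scheduler.manage", ["scheduler.view"]),
  ("profiles.delete", ["profiles.edit", "profiles.create", "profiles.view"]),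
  ("profiles.edit", ["profiles.create", "profiles.view"]),
  ("profiles.create", ["profiles.view"])] := by decide

set_option maxHeartbeats 4000000 in
theorem pvChildrenB_eq (p : String) : pvChildrenB p = pvInherited p := by
  rw [pvChildrenB, pvInherited, PySem.Dict.getD_eq_get?_getD, pvDict_mk]
  rw [PySem.Dict.get?_mk_cons]
  by_cases h0 : ("content.edit_team" == p) = true
  · rw [if_pos h0, if_pos h0]; rfl
  · rw [if_neg h0, if_neg h0]
    rw [PySem.Dict.get?_mk_cons]
    by_cases h1 : ("content.delete_team" == p) = true
    · rw [if_pos h1, if_pos h1]; rfl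
    · rw [if_neg h1, if_neg h1]
      rw [PySem.Dict.get?_mk_cons]
      by_cases h2 : ("content.publish" == p) = true
      · rw [if_pos h2, if_pos h2]; rfl
      · rw [if_neg h2, if_neg h2]
        rw [PySem.Dict.get?_mk_cons]
        by_cases h3 : ("analytics.view_team" == p) = true
        · rw [if_pos h3, if_pos h3]; rfl
        · rw [if_neg h3, if_neg h3]
          rw [PySem.Dict.get?_mk_cons]
          by_cases h4 : ("analytics.view_enterprise" == p) = true
          · rw [if_pos h4, if_pos h4]; rfl
          · rw [if_neg h4, if_neg h4]
            rw [PySem.Dict.get?_mk_cons]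
            by_cases h5 : ("analytics.export" == p) = true
            · rw [if_pos h5, if_pos h5]; rfl
            · rw [if_neg h5, if_neg h5]
              rw [PySem.Dict.get?_mk_cons]
              by_cases h6 : ("team.remove_members" == p) = true
              · rw [if_pos h6, if_pos h6]; rfl
              · rw [if_neg h6, if_neg h6]
                rw [PySem.Dict.get?_mk_cons]
                by_cases h7 : ("team.invite_members" == p) = true
                · rw [if_pos h7, if_pos h7]; rfl
                · rw [if_neg h7, if_neg h7]
                  rw [PySem.Dict.get?_mk_cons]
                  by_cases h8 : ("team.assign_roles" == p) = true
                  · rw [if_pos h8, if_pos h8]; rfl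
                  · rw [if_neg h8, if_neg h8]
                    rw [PySem.Dict.get?_mk_cons]
                    by_cases h9 : ("roles.delete" == p) = true
                    · rw [if_pos h9, if_pos h9]; rfl
                    · rw [if_neg h9, if_neg h9]
                      rw [PySem.Dict.get?_mk_cons]
                      by_cases h10 : ("roles.edit" == p) = true
                      · rw [if_pos h10, if_pos h10]; rfl
                      · rw [if_neg h10, if_neg h10]
                        rw [PySem.Dict.get?_mk_cons]
                        by_cases h11 : ("roles.create" == p) = true
                        · rw [if_pos h11, if_pos h11]; rfl
                        · rw [if_neg h11, if_neg h11]
                          rw [PySem.Dict.get?_mk_cons]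
                          by_cases h12 : ("settings.edit_billing" == p) = true
                          · rw [if_pos h12, if_pos h12]; rfl
                          · rw [if_neg h12, if_neg h12]
                            rw [PySem.Dict.get?_mk_cons]
                            by_cases h13 : ("settings.edit_integrations" == p) = true
                            · rw [if_pos h13, if_pos h13]; rfl
                            · rw [if_neg h13, if_neg h13]
                              rw [PySem.Dict.get?_mk_cons]
                              by_cases h14 : ("settings.edit_branding" == p) = true
                              · rw [if_pos h14, if_pos h14]; rfl
                              · rw [if_neg h14, if_neg h14]
                                rw [PySem.Dict.get?_mk_cons]
                                by_cases h15 : ("knowledge.delete" == p) = true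
                                · rw [if_pos h15, if_pos h15]; rfl
                                · rw [if_neg h15, if_neg h15]
                                  rw [PySem.Dict.get?_mk_cons]
                                  by_cases h16 : ("knowledge.upload" == p) = true
                                  · rw [if_pos h16, if_pos h16]; rfl
                                  · rw [if_neg h16, if_neg h16]
                                    rw [PySem.Dict.get?_mk_cons]
                                    by_cases h17 : ("scheduler.manage" == p) = true
                                    · rw [if_pos h17, if_pos h17]; rfl
                                    · rw [if_neg h17, if_neg h17]
                                      rw [PySem.Dict.get?_mk_cons]
                                      by_cases h18 : ("profiles.delete" == p) = true
                                      · rw [if_pos h18, if_pos h18]; rfl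
                                      · rw [if_neg h18, if_neg h18]
                                        rw [PySem.Dict.get?_mk_cons]
                                        by_cases h19 : ("profiles.edit" == p) = true
                                        · rw [if_pos h19, if_pos h19]; rfl
                                        · rw [if_neg h19, if_neg h19]
                                          rw [PySem.Dict.get?_mk_cons]
                                          by_cases h20 : ("profiles.create" == p) = true
                                          · rw [if_pos h20, if_pos h20]; rfl
                                          · rw [if_neg h20, if_neg h20]
                                            rfl

theorem pvInitB_eq (permissions : List String) :
    pvInitB permissions = PySem.Set.ofList permissions := by
  have hfun : (fun (seen : List String) p => if seen.contains p then seen else seen.concat p)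
      = PySem.Set.add (α := String) := by
    funext s p
    simp [PySem.Set.add, PySem.Set.contains, List.concat_eq_append]
  rw [pvInitB, PySem.Set.ofList_eq_foldl, hfun]

theorem pvVisitB_eq (f : Nat) : ∀ (seen work : List String),
    pvVisitB seen work f = pvBFS f seen work := by
  induction f with
  | zero => intro seen work; rfl
  | succ f ih =>
    intro seen work
    cases work with
    | nil => rfl
    | cons p rest =>
      show pvVisitB _ _ f = pvBFS (f + 1) seen (p :: rest)
      rw [pvBFS]
      have hfold : (pvChildrenB p).foldl
          (fun (st : List String × List String) c =>
            if st.1.contains c then st else (st.1.concat c, st.2.concat c)) (seen, rest)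
          = (pvInherited p).foldl
          (fun st c => if c ∈ st.1 then st else (st.1 ++ [c], st.2 ++ [c])) (seen, rest) := by
        have hfun : (fun (st : List String × List String) c =>
            if st.1.contains c then st else (st.1.concat c, st.2.concat c))
            = (fun (st : List String × List String) c =>
            if c ∈ st.1 then st else (st.1 ++ [c], st.2 ++ [c])) := by
          funext st c
          by_cases h : c ∈ st.1 <;> simp [h, List.concat_eq_append]
        rw [pvChildrenB_eq, hfun]
      rw [hfold]
      exact ih _ _

theorem pvAdd_prefix (r : List String) (c : String) : r <+: pvAdd r c := by
  unfold pvAdd; split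
  · exact List.prefix_rfl
  · exact ⟨[c], rfl⟩

theorem foldl_pvAdd_prefix (l : List String) (r : List String) : r <+: l.foldl pvAdd r := by
  induction l generalizing r with
  | nil => exact List.prefix_rfl
  | cons c l ih => exact (pvAdd_prefix r c).trans (ih (pvAdd r c))

theorem foldl_pvPush_prefix (l : List String) (r : List String) : r <+: l.foldl pvPush r := by
  induction l generalizing r with
  | nil => exact List.prefix_rfl
  | cons p l ih => exact (foldl_pvAdd_prefix (pvInherited p) r).trans (ih (pvPush r p))

theorem mem_foldl_pvAdd_of_mem {c : String} (l : List String) (r : List String) (h : c ∈ l) :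
    c ∈ l.foldl pvAdd r := by
  induction l generalizing r with
  | nil => cases h
  | cons a l ih =>
    rcases List.mem_cons.mp h with rfl | h
    · have hc : c ∈ pvAdd r c := by unfold pvAdd; split <;> simp_all
      exact (foldl_pvAdd_prefix l (pvAdd r c)).subset hc
    · exact ih (pvAdd r a) h

theorem mem_foldl_pvAdd {x : String} {l r : List String} (h : x ∈ l.foldl pvAdd r) :
    x ∈ r ∨ x ∈ l := by
  induction l generalizing r with
  | nil => exact Or.inl h
  | cons c l ih =>
    rcases ih (r := pvAdd r c) h with h1 | h1
    · unfold pvAdd at h1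
      split at h1
      · exact Or.inl h1
      · rcases List.mem_append.mp h1 with h2 | h2
        · exact Or.inl h2
        · simp at h2; simp [h2]
    · simp [h1]

theorem mem_foldl_pvPush {x : String} {l r : List String} (h : x ∈ l.foldl pvPush r) :
    x ∈ r ∨ ∃ p ∈ l, x ∈ pvInherited p := by
  induction l generalizing r with
  | nil => exact Or.inl h
  | cons p l ih =>
    rcases ih (r := pvPush r p) h with h1 | ⟨p', hp', hc⟩
    · rcases mem_foldl_pvAdd h1 with h2 | h2
      · exact Or.inl h2
      · exact Or.inr ⟨p, by simp, h2⟩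
    · exact Or.inr ⟨p', by simp [hp'], hc⟩

theorem mem_foldl_pvPush_children {p c : String} (l : List String) (r : List String)
    (hp : p ∈ l) (hc : c ∈ pvInherited p) : c ∈ l.foldl pvPush r := by
  induction l generalizing r with
  | nil => cases hp
  | cons a l ih =>
    rcases List.mem_cons.mp hp with rfl | hp
    · have : c ∈ pvPush r p := mem_foldl_pvAdd_of_mem (pvInherited p) r hc
      exact (foldl_pvPush_prefix l (pvPush r p)).subset this
    · exact ih (pvPush r a) hp

theorem nodup_foldl_pvAdd (l : List String) {r : List String} (h : r.Nodup) :
    (l.foldl pvAdd r).Nodup := by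
  induction l generalizing r with
  | nil => exact h
  | cons c l ih =>
    apply ih
    unfold pvAdd
    split
    · exact h
    · rename_i hc
      simp [List.nodup_append, h]
      intro a ha heq
      exact hc (heq ▸ ha)

theorem nodup_foldl_pvPush (l : List String) {r : List String} (h : r.Nodup) :
    (l.foldl pvPush r).Nodup := by
  induction l generalizing r with
  | nil => exact h
  | cons p l ih => exact ih (nodup_foldl_pvAdd (pvInherited p) h)

theorem foldl_pvAdd_of_subset {l r : List String} (h : ∀ c ∈ l, c ∈ r) :
    l.foldl pvAdd r = r := by
  induction l with
  | nil => rfl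
  | cons c l ih =>
    rw [List.foldl_cons, show pvAdd r c = r from by simp [pvAdd, h c (by simp)]]
    exact ih fun a ha => h a (by simp [ha])

theorem foldl_pvPush_sat {l r : List String} (h : ∀ p ∈ l, ∀ c ∈ pvInherited p, c ∈ r) :
    l.foldl pvPush r = r := by
  induction l with
  | nil => rfl
  | cons p l ih =>
    rw [List.foldl_cons, show pvPush r p = r from foldl_pvAdd_of_subset (h p (by simp))]
    exact ih fun a ha => h a (by simp [ha])

theorem ne_of_prefix_ne {r s t : List String} (h1 : r <+: s) (h2 : s <+: t) (hne : s ≠ r) :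
    t ≠ r := by
  intro heq
  subst heq
  exact hne (List.Sublist.antisymm h2.sublist h1.sublist)

theorem innerA (l : List String) (r : List String) (b : Bool) :
    l.foldl (fun st c => if c ∈ st.1 then st else (st.1 ++ [c], true)) (r, b)
      = (l.foldl pvAdd r, b || decide (l.foldl pvAdd r ≠ r)) := by
  induction l generalizing r b with
  | nil => simp
  | cons c l ih =>
    rw [List.foldl_cons, List.foldl_cons]
    by_cases hc : c ∈ r
    · rw [show (if c ∈ (r, b).1 then (r, b) else ((r, b).1 ++ [c], true)) = (r, b) from by simp [hc],
          show pvAdd r c = r from by simp [pvAdd, hc], ih]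
    · have hne : l.foldl pvAdd (r ++ [c]) ≠ r :=
        ne_of_prefix_ne ⟨[c], rfl⟩ (foldl_pvAdd_prefix l (r ++ [c])) (by simp)
      rw [show (if c ∈ (r, b).1 then (r, b) else ((r, b).1 ++ [c], true)) = (r ++ [c], true) from by simp [hc],
          show pvAdd r c = r ++ [c] from by simp [pvAdd, hc], ih]
      simp [hne]

theorem outerA (S : List String) : ∀ (r0 : List String) (b : Bool),
    S.foldl (fun st perm =>
      (pvInherited perm).foldl (fun st c => if c ∈ st.1 then st else (st.1 ++ [c], true)) st) (r0, b)
      = (S.foldl pvPush r0, b || decide (S.foldl pvPush r0 ≠ r0)) := by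
  induction S with
  | nil => intro r0 b; simp
  | cons p S ih =>
    intro r0 b
    rw [List.foldl_cons, List.foldl_cons]
    rw [innerA, ih]
    rw [show (pvInherited p).foldl pvAdd r0 = pvPush r0 p from rfl]
    by_cases h : pvPush r0 p = r0
    · rw [h]
      simp
    · have h2 : S.foldl pvPush (pvPush r0 p) ≠ r0 :=
        ne_of_prefix_ne (foldl_pvAdd_prefix (pvInherited p) r0) (foldl_pvPush_prefix S (pvPush r0 p)) h
      simp [h, h2]

theorem passA_eq (r : List String) :
    pvPassA r = (r.foldl pvPush r, decide (r.foldl pvPush r ≠ r)) := by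
  unfold pvPassA
  rw [outerA]
  simp

theorem innerB (l : List String) (s q : List String) :
    l.foldl (fun st c => if c ∈ st.1 then st else (st.1 ++ [c], st.2 ++ [c])) (s, q)
      = (l.foldl pvAdd s, q ++ (l.foldl pvAdd s).drop s.length) := by
  induction l generalizing s q with
  | nil => simp
  | cons c l ih =>
    rw [List.foldl_cons, List.foldl_cons]
    by_cases hc : c ∈ s
    · rw [show (if c ∈ (s, q).1 then (s, q) else ((s, q).1 ++ [c], (s, q).2 ++ [c])) = (s, q) from by simp [hc],
          show pvAdd s c = s from by simp [pvAdd, hc], ih]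
    · rw [show (if c ∈ (s, q).1 then (s, q) else ((s, q).1 ++ [c], (s, q).2 ++ [c])) = (s ++ [c], q ++ [c]) from by simp [hc],
          show pvAdd s c = s ++ [c] from by simp [pvAdd, hc], ih]
      obtain ⟨t, ht⟩ := foldl_pvAdd_prefix l (s ++ [c])
      have hd1 : ((s ++ [c]) ++ t).drop s.length = [c] ++ t := by
        rw [List.append_assoc, List.drop_left]
      have hd2 : ((s ++ [c]) ++ t).drop (s ++ [c]).length = t := List.drop_left
      rw [← ht, hd1, hd2]
      simp

theorem bfs_nil (f : Nat) (s : List String) : pvBFS f s [] = s := by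
  cases f <;> rfl

theorem bfs_batch (q : List String) : ∀ (tail s : List String) (f : Nat),
    pvBFS (q.length + f) s (q ++ tail)
      = pvBFS f (q.foldl pvPush s) (tail ++ (q.foldl pvPush s).drop s.length) := by
  induction q with
  | nil => intro tail s f; simp [List.drop_length]
  | cons p q ih =>
    intro tail s f
    have hfuel : (p :: q).length + f = (q.length + f) + 1 := by simp; omega
    rw [hfuel, List.cons_append]
    show pvBFS (q.length + f) _ _ = _
    rw [innerB]
    obtain ⟨u, hu⟩ := foldl_pvAdd_prefix (pvInherited p) s
    have hdrop : ((pvInherited p).foldl pvAdd s).drop s.length = u := by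
      rw [← hu, List.drop_left]
    rw [hdrop, List.append_assoc, ih (tail ++ u) ((pvInherited p).foldl pvAdd s) f]
    rw [List.foldl_cons]
    show _ = pvBFS f (q.foldl pvPush (pvPush s p)) _
    have hP : pvPush s p = (pvInherited p).foldl pvAdd s := rfl
    obtain ⟨t, ht⟩ := foldl_pvPush_prefix q (pvPush s p)
    rw [hP] at ht
    rw [hP]
    rw [← ht, ← hu]
    rw [List.drop_left' (by simp), List.append_assoc s u t, List.drop_left]
    simp

theorem children_sub {p c : String} (h : c ∈ pvInherited p) : c ∈ pvKidsD := by
  unfold pvInherited at h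
  unfold pvKidsD
  rw [PySem.List.mem_dedup, List.mem_flatten]
  rw [PySem.Dict.getD_eq_get?_getD] at h
  cases hg : PySem.Dict.get? PERMISSION_INHERITANCE p with
  | none => rw [hg] at h; simp at h
  | some v =>
    rw [hg] at h
    simp only [Option.getD_some] at h
    refine ⟨v, ?_, h⟩
    have hm := PySem.Dict.mem_items_of_get?_eq_some _ hg
    simp only [PySem.Dict.values]
    exact List.mem_map.mpr ⟨(p, v), hm, rfl⟩

theorem pvMissing_append {R news : List String} (hnd : (R ++ news).Nodup)
    (hk : ∀ x ∈ news, x ∈ pvKidsD) :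
    news.length + pvMissing (R ++ news) = pvMissing R := by
  classical
  unfold pvMissing
  have hfilter : pvKidsD.filter (fun x => decide (x ∉ R ++ news))
      = (pvKidsD.filter (fun x => decide (x ∉ R))).filter (fun x => decide (x ∉ news)) := by
    rw [List.filter_filter]
    apply List.filter_congr
    intro x _
    simp [List.mem_append, not_or]
    exact Bool.and_comm _ _
  rw [hfilter]
  set L := pvKidsD.filter (fun x => decide (x ∉ R)) with hL
  have hLnd : L.Nodup := (PySem.List.nodup_dedup _).filter _
  have hnewsnd : news.Nodup := (List.nodup_append.mp hnd).2.1
  have hdisj : R.Disjoint news := List.disjoint_of_nodup_append hnd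
  have hsplit : (L.filter (fun x => decide (x ∈ news))).length
      + (L.filter (fun x => decide (x ∉ news))).length = L.length := by
    have h0 := List.length_eq_length_filter_add (l := L) (f := fun x => decide (x ∈ news))
    have h1 : L.filter (fun x => !decide (x ∈ news)) = L.filter (fun x => decide (x ∉ news)) := by
      apply List.filter_congr
      intro x _
      simp
    rw [h1] at h0
    omega
  have hcount : (L.filter (fun x => decide (x ∈ news))).length = news.length := by
    have hnd2 : (L.filter (fun x => decide (x ∈ news))).Nodup := hLnd.filter _
    have hts : (L.filter (fun x => decide (x ∈ news))).toFinset = news.toFinset := by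
      ext x
      simp only [List.mem_toFinset, List.mem_filter, decide_eq_true_eq, hL]
      constructor
      · rintro ⟨_, hx⟩; exact hx
      · intro hx
        exact ⟨⟨hk x hx, fun hR => hdisj hR hx⟩, hx⟩
    calc (L.filter (fun x => decide (x ∈ news))).length
        = (L.filter (fun x => decide (x ∈ news))).toFinset.card := (List.toFinset_card_of_nodup hnd2).symm
      _ = news.toFinset.card := by rw [hts]
      _ = news.length := List.toFinset_card_of_nodup hnewsnd
  omega

theorem pvMissing_le (r : List String) : pvMissing r ≤ pvKidsD.length := by
  exact List.length_filter_le _ _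

theorem ofList_length_le (xs : List String) : (PySem.Set.ofList xs).length ≤ xs.length := by
  exact PySem.Set.length_ofList_le xs

theorem main_lemma : ∀ (fA : Nat) (P q : List String) (fB : Nat),
    (P ++ q).Nodup →
    (∀ p ∈ P, ∀ c ∈ pvInherited p, c ∈ P ++ q) →
    pvMissing (P ++ q) + 1 ≤ fA →
    q.length + pvMissing (P ++ q) ≤ fB →
    pvLoopA fA (P ++ q) = pvBFS fB (P ++ q) q := by
  intro fA
  induction fA with
  | zero => intro P q fB _ _ hA _; omega
  | succ fA ih =>
    intro P q fB hnd hsat hA hB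
    have hPP : (P ++ q).foldl pvPush (P ++ q) = q.foldl pvPush (P ++ q) := by
      rw [List.foldl_append, foldl_pvPush_sat hsat]
    set R := P ++ q with hR
    set F := q.foldl pvPush R with hF
    obtain ⟨news, hnews⟩ := foldl_pvPush_prefix q R
    rw [← hF] at hnews
    have hfB : fB = q.length + (fB - q.length) := by omega
    have hdrop : F.drop R.length = news := by rw [← hnews, List.drop_left]
    have hBside : pvBFS fB R q = pvBFS (fB - q.length) F news := by
      conv_lhs => rw [show q = q ++ [] from (List.append_nil q).symm]
      conv_lhs => rw [hfB]
      rw [bfs_batch q [] R (fB - q.length), List.nil_append, ← hF, hdrop]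
    have hAside : pvLoopA (fA + 1) R = if F = R then F else pvLoopA fA F := by
      show (if (pvPassA R).2 then pvLoopA fA (pvPassA R).1 else (pvPassA R).1) = _
      rw [passA_eq, hPP]
      by_cases h : F = R
      · simp [h]
      · simp [h]
    rw [hAside, hBside]
    by_cases hn : news = []
    · have hFR : F = R := by rw [← hnews, hn, List.append_nil]
      rw [if_pos hFR, hn, bfs_nil]
    · have hFnd : F.Nodup := by rw [hF]; exact nodup_foldl_pvPush q hnd
      have hndRN : (R ++ news).Nodup := by rw [hnews]; exact hFnd
      have hne : ¬ F = R := by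
        intro h
        apply hn
        apply List.append_cancel_left (as := R)
        rw [hnews, h, List.append_nil]
      rw [if_neg hne]
      have hk : ∀ x ∈ news, x ∈ pvKidsD := by
        intro x hx
        have hxF : x ∈ q.foldl pvPush R := by
          rw [← hF, ← hnews]
          simp [hx]
        rcases mem_foldl_pvPush hxF with hxR | ⟨p, hp, hc⟩
        · exact absurd hx (List.disjoint_of_nodup_append hndRN hxR)
        · exact children_sub hc
      have hmiss := pvMissing_append hndRN hk
      have hn1 : 1 ≤ news.length := List.length_pos_iff.mpr hn
      have hsat' : ∀ p ∈ R, ∀ c ∈ pvInherited p, c ∈ R ++ news := by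
        intro p hp c hc
        rw [hnews]
        rcases List.mem_append.mp hp with hpP | hpq
        · exact List.IsPrefix.subset ⟨news, hnews⟩ (hsat p hpP c hc)
        · rw [hF]
          exact mem_foldl_pvPush_children q R hpq hc
      have hA' : pvMissing (R ++ news) + 1 ≤ fA := by omega
      have hB' : news.length + pvMissing (R ++ news) ≤ fB - q.length := by omega
      have hmain := ih R news (fB - q.length) hndRN hsat' hA' hB'
      rw [hnews] at hmain
      exact hmain

theorem kids_card : (PySem.Dict.values PERMISSION_INHERITANCE).flatten.length = 33 := by
  decide

-- ===== VERDICT (by name: the statement is the Claim_ definition above) =====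
theorem resolve_inherited_permissions_spec : Claim_equal_resolve_inherited_permissions := by
  intro permissions _
  unfold Spec_resolve_inherited_permissions
  unfold resolve_inherited_permissions resolve_inherited_permissions_alt
  rw [pvInitB_eq, pvVisitB_eq]
  have hmiss : pvMissing (PySem.Set.ofList permissions) ≤ pvKidsD.length := pvMissing_le _
  have hkd : pvKidsD.length ≤ (PySem.Dict.values PERMISSION_INHERITANCE).flatten.length := by
    have : pvKidsD = PySem.Set.ofList ((PySem.Dict.values PERMISSION_INHERITANCE).flatten) := by
      simp [pvKidsD]
    rw [this]; exact ofList_length_le _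
  have hlen : (PySem.Set.ofList permissions).length ≤ permissions.length := ofList_length_le _
  have h := main_lemma pvFuelA [] (PySem.Set.ofList permissions)
    (permissions.length + 34)
    (PySem.Set.nodup_ofList permissions)
    (by simp)
    (by simp only [List.nil_append]; unfold pvFuelA; omega)
    (by simp only [List.nil_append]; rw [kids_card] at hkd; omega)
  exact h
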